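-- pv_equiv track=rewrite | github.com/macairececile/Authors_Identification_NLP | scripts/Test_Books.py | number_of_punctuation
-- ===== SOURCE A (Python) =====
-- import string
--
-- def number_of_punctuation(doc):  # number of punctuation signs in a list of books
--     resultlist = []
--     for x in doc:
--         text = ''
--         for i in x:
--             text += i
--         punctuation = string.punctuation
--         n = 0
--         for l in text:
--             if l in punctuation:
--                 n += 1
--         resultlist.append(n)
--     return resultlist
-- ===== SOURCE B (Python) =====
-- import string
-- from collections import Counter
--
-- def number_of_punctuation(doc):
--     result = []
--     for x in doc:
--         freq = Counter(''.join(x))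
--         result.append(sum(freq[p] for p in string.punctuation))
--     return result
-- ===== Notes on version B (the rewrite author's own statement) =====
-- stated objective: alternative
-- what changed: Per book, B builds a character-frequency Counter of the joined text once and then sums the counts over the fixed punctuation alphabet, instead of A's per-character membership test against string.punctuation.
import Mathlib
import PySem

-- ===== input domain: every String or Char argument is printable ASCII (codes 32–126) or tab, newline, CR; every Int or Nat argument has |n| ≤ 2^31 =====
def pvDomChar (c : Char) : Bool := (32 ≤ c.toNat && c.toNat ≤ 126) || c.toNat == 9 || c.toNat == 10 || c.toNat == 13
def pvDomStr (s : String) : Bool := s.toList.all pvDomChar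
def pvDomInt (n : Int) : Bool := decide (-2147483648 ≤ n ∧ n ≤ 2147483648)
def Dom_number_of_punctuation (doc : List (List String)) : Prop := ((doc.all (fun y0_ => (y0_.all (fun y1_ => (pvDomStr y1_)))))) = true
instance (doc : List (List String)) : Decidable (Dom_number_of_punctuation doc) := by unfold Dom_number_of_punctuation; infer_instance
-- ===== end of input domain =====

-- ===== PORT A =====
-- string.punctuation, as a list of chars (strings proved on the List Char side per PySem convention)
def pyPunct : List Char := "!\"#$%&'()*+,-./:;<=>?@[\\]^_`{|}~".toList

def number_of_punctuation (doc : List (List String)) : List Int :=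
  doc.foldl (fun resultlist x =>
    -- text = '' ; for i in x: text += i
    let text : List Char := x.foldl (fun t i => t ++ i.toList) []
    -- n = 0 ; for l in text: if l in punctuation: n += 1
    let n : Int := text.foldl (fun n l => if pyPunct.contains l then n + 1 else n) 0
    resultlist ++ [n]) []

-- ===== PORT B =====
-- B: freq = Counter(''.join(x)); sum(freq[p] for p in string.punctuation)
def number_of_punctuation_alt (doc : List (List String)) : List Int :=
  doc.map (fun x =>
    let freq := PySem.Dict.counter ((x.map String.toList).flatten)
    (pyPunct.map (fun p => freq.getD p 0)).sum)

-- ===== PRECONDITION & SPEC =====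
def Spec_number_of_punctuation (doc : List (List String)) (out : List Int) : Prop := out = number_of_punctuation_alt doc
instance (doc : List (List String)) (out : List Int) : Decidable (Spec_number_of_punctuation doc out) := by unfold Spec_number_of_punctuation; infer_instance

-- ===== CLAIM (what is proved, stated in full; the proofs are below) =====
def Claim_equal_number_of_punctuation : Prop := ∀ (doc : List (List String)), Dom_number_of_punctuation doc → Spec_number_of_punctuation doc (number_of_punctuation doc)

-- ===== LEMMAS AND PROOFS =====

-- ''.join-style foldl of appends equals flatten of the mapped lists
theorem foldl_append_toList (x : List String) (acc : List Char) :
    x.foldl (fun t i => t ++ i.toList) acc = acc ++ (x.map String.toList).flatten := by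
  induction x generalizing acc with
  | nil => simp
  | cons i x ih => simp [List.foldl_cons, ih, List.append_assoc]

-- counting matches of disjoint predicates splits
theorem countP_or_disjoint (s : List Char) (pa pb : Char → Bool)
    (h : ∀ l, ¬(pa l = true ∧ pb l = true)) :
    s.countP (fun l => pa l || pb l) = s.countP pa + s.countP pb := by
  induction s with
  | nil => simp
  | cons c s ih =>
    by_cases ha : pa c = true <;> by_cases hb : pb c = true
    · exact absurd ⟨ha, hb⟩ (h c)
    all_goals (simp [ha, hb, ih]; try omega)

-- summing the per-character counts over a duplicate-free alphabet equals one countP pass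
theorem sum_counts_eq_countP (ps : List Char) (hnd : ps.Nodup) (s : List Char) :
    (ps.map (fun p => (s.count p : Int))).sum = (s.countP (fun l => ps.contains l) : Int) := by
  induction ps with
  | nil => simp
  | cons p ps ih =>
    have hnd' := hnd
    rw [List.nodup_cons] at hnd'
    have hsplit : s.countP (fun l => (p :: ps).contains l)
        = s.countP (fun l => l == p) + s.countP (fun l => ps.contains l) := by
      have := countP_or_disjoint s (fun l => l == p) (fun l => ps.contains l)
        (by intro l ⟨h1, h2⟩; exact hnd'.1 (by simp at h1 h2; exact h1 ▸ h2))
      simpa [List.contains_cons] using this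
    rw [List.map_cons, List.sum_cons, ih hnd'.2, hsplit, List.count]
    push_cast
    ring

theorem pyPunct_nodup : pyPunct.Nodup := by decide

-- the two per-book computations agree
theorem book_eq (x : List String) :
    (let text : List Char := x.foldl (fun t i => t ++ i.toList) []
     text.foldl (fun n l => if pyPunct.contains l then n + 1 else n) (0 : Int))
    = (pyPunct.map (fun p => (PySem.Dict.counter ((x.map String.toList).flatten)).getD p 0)).sum := by
  simp only [foldl_append_toList, List.nil_append, PySem.List.foldl_if_add_one,
    PySem.Dict.getD_counter, zero_add]
  rw [sum_counts_eq_countP pyPunct pyPunct_nodup]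

-- ===== VERDICT (by name: the statement is the Claim_ definition above) =====
theorem number_of_punctuation_spec : Claim_equal_number_of_punctuation := by
  intro doc _
  unfold Spec_number_of_punctuation number_of_punctuation number_of_punctuation_alt
  rw [PySem.List.foldl_append_singleton_eq_map, List.nil_append]
  exact List.map_congr_left (fun x _ => book_eq x)
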